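-- pv_equiv track=rewrite | github.com/geeklicantropo/RAG--Improvement-Analysis | src/experiment_validator.py | _check_output_determinism
-- ===== SOURCE A (Python) =====
-- from typing import Dict, List, Any, Optional
--
-- def _check_output_determinism(results: List[Dict]) -> bool:
--     # Check if identical inputs produce identical outputs
--     output_map = {}
--     for r in results:
--         input_key = f"{r.get('query')}_{r.get('context')}"
--         output = r.get('generated_answer')
--         if input_key in output_map and output_map[input_key] != output:
--             return False
--         output_map[input_key] = output
--     return True
-- ===== SOURCE B (Python) =====
-- def _check_output_determinism(results):
--     # Sort the (input_key, output) pairs by key, then a single adjacent-pair scan: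
--     # identical inputs are contiguous after sorting, so any non-deterministic pair
--     # shows up as two neighbours with equal key and unequal output.
--     keyed = sorted(
--         ((f"{r.get('query')}_{r.get('context')}", r.get('generated_answer')) for r in results),
--         key=lambda p: p[0],
--     )
--     for (k1, o1), (k2, o2) in zip(keyed, keyed[1:]):
--         if k1 == k2 and o1 != o2:
--             return False
--     return True
-- ===== Notes on version B (the rewrite author's own statement) =====
-- stated objective: alternative
-- what changed: Replaces the streaming dict of last-seen outputs (with interleaved check and early return) by sorting the (input_key, output) pairs by key and scanning adjacent pairs once: after a stable sort equal keys are contiguous, so non-determinism appears as two neighbours with equal key and unequal output.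
import Mathlib
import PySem

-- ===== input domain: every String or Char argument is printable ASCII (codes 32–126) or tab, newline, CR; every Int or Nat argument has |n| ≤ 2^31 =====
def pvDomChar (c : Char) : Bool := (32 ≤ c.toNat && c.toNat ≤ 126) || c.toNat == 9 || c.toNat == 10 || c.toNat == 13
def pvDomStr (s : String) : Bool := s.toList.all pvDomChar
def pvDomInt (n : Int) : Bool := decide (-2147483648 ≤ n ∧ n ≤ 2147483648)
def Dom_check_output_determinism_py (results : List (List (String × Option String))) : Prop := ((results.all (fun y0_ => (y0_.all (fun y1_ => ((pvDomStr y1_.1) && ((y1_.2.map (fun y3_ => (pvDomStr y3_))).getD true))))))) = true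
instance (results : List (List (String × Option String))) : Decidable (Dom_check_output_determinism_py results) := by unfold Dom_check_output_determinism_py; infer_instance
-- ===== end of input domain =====

-- B replaces A's streaming dict-of-last-outputs check by a sort of the (key, output)
-- pairs followed by one adjacent-pair scan (alternative algorithm, not claimed faster).

-- ===== PORT A =====
-- f"{x}" for x : Optional[str] — "None" for None, the string itself otherwise
def pvFmt : Option String → String
  | none => "None"
  | some s => s

-- input_key = f"{r.get('query')}_{r.get('context')}"
def pvKey (r : List (String × Option String)) : String :=
  String.ofList ((pvFmt (PySem.Dict.getD (PySem.Dict.mk r) "query" none)).toList ++ '_' :: (pvFmt (PySem.Dict.getD (PySem.Dict.mk r) "context" none)).toList)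

-- the for-loop of A: output_map carries the last output seen per input_key
def pvLoopA : List (List (String × Option String)) → PySem.Dict String (Option String) → Bool
  | [], _ => true
  | r :: rest, m =>
    let k := pvKey r
    let o := PySem.Dict.getD (PySem.Dict.mk r) "generated_answer" none
    if m.contains k && !(m.getD k none == o) then false
    else pvLoopA rest (m.insert k o)

def check_output_determinism_py (results : List (List (String × Option String))) : Bool :=
  pvLoopA results PySem.Dict.empty

-- ===== PORT B =====
-- (f"{r.get('query')}_{r.get('context')}", r.get('generated_answer'))
def pvPairB (r : List (String × Option String)) : String × Option String :=
  (pvKey r, PySem.Dict.getD (PySem.Dict.mk r) "generated_answer" none)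

def check_output_determinism_py_alt (results : List (List (String × Option String))) : Bool :=
  -- keyed = sorted((... for r in results), key=lambda p: p[0])
  let keyed := PySem.List.sorted (results.map pvPairB) (fun p => p.1) false
  -- for (k1,o1),(k2,o2) in zip(keyed, keyed[1:]): if k1 == k2 and o1 != o2: return False
  -- keyed[1:] is keyed.drop 1 (non-negative slice of a list: exact)
  (List.zip keyed (keyed.drop 1)).all (fun q => !(q.1.1 == q.2.1 && !(q.1.2 == q.2.2)))

-- ===== PRECONDITION & SPEC =====
def Spec_check_output_determinism_py (results : List (List (String × Option String))) (out : Bool) : Prop := out = check_output_determinism_py_alt results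
instance (results : List (List (String × Option String))) (out : Bool) : Decidable (Spec_check_output_determinism_py results out) := by unfold Spec_check_output_determinism_py; infer_instance

-- ===== CLAIM (what is proved, stated in full; the proofs are below) =====
def Claim_equal_check_output_determinism_py : Prop := ∀ (results : List (List (String × Option String))), Dom_check_output_determinism_py results → Spec_check_output_determinism_py results (check_output_determinism_py results)

-- ===== LEMMAS AND PROOFS =====

-- "determinism" as a relation on (key, output) pairs: equal keys force equal outputs
def pvPP (p q : String × Option String) : Prop := p.1 = q.1 → p.2 = q.2

lemma pv_contains_iff (m : PySem.Dict String (Option String)) (k : String) :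
    m.contains k = true ↔ (m.get? k).isSome := by
  simp [PySem.Dict.contains, PySem.Dict.get?, Option.isSome_map, List.any_eq_true, List.find?_isSome]

lemma pv_mem_of_get? (m : PySem.Dict String (Option String)) {k : String} {v : Option String}
    (h : m.get? k = some v) : (k, v) ∈ m.items := by
  simp only [PySem.Dict.get?, Option.map_eq_some_iff] at h
  obtain ⟨p, hp, hv⟩ := h
  have hm := List.mem_of_find?_eq_some hp
  have hk : p.1 = k := by simpa using List.find?_some hp
  have : p = (k, v) := by
    cases p; simp_all
  simpa [this] using hm

lemma pv_uniq (m : PySem.Dict String (Option String)) (hnd : m.keys.Nodup)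
    {k : String} {v : Option String} (h : m.get? k = some v) :
    ∀ p ∈ m.items, p.1 = k → p = (k, v) := by
  intro p hp hpk
  have hmem : (k, v) ∈ m.items := pv_mem_of_get? m h
  have := List.inj_on_of_nodup_map (f := Prod.fst) (l := m.items) hnd hp hmem (by simpa using hpk)
  simpa using this

lemma pv_insert_self (m : PySem.Dict String (Option String)) (hnd : m.keys.Nodup)
    {k : String} {v : Option String} (h : m.get? k = some v) :
    m.insert k v = m := by
  have hc : m.contains k = true := (pv_contains_iff m k).mpr (by simp [h])
  have : List.map (fun p => if p.1 = k then (k, v) else p) m.items = m.items := by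
    rw [List.map_congr_left (g := id) ?_, List.map_id]
    intro p hp
    by_cases hk : p.1 = k
    · have := pv_uniq m hnd h p hp hk
      simp [this]
    · simp [hk]
  simp [PySem.Dict.insert, hc]
  exact PySem.Dict.ext this

lemma pv_insert_fresh (m : PySem.Dict String (Option String)) {k : String} (v : Option String)
    (h : m.contains k = false) :
    (m.insert k v).items = m.items ++ [(k, v)] := by
  simp [PySem.Dict.insert, h]

lemma pv_contains_keys (m : PySem.Dict String (Option String)) (k : String) :
    m.contains k = true ↔ k ∈ m.keys := by
  simp only [PySem.Dict.contains, PySem.Dict.keys, List.any_eq_true, List.mem_map, beq_iff_eq]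

lemma pv_pairwise_items (m : PySem.Dict String (Option String)) (hnd : m.keys.Nodup) :
    List.Pairwise pvPP m.items := by
  have h1 : List.Pairwise (fun p q : String × Option String => p.1 ≠ q.1) m.items :=
    List.pairwise_map.mp (by simpa [PySem.Dict.keys] using hnd)
  exact h1.imp (fun h he => absurd he h)

lemma pv_loopA_iff (l : List (List (String × Option String)))
    (m : PySem.Dict String (Option String)) (hnd : m.keys.Nodup) :
    pvLoopA l m = true ↔ List.Pairwise pvPP (m.items ++ l.map pvPairB) := by
  induction l generalizing m with
  | nil =>
    simp only [pvLoopA, List.map_nil, List.append_nil, true_iff]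
    exact pv_pairwise_items m hnd
  | cons r rest ih =>
    simp only [pvLoopA, List.map_cons]
    set k := pvKey r with hk
    set o := PySem.Dict.getD (PySem.Dict.mk r) "generated_answer" none with ho
    have hpair : pvPairB r = (k, o) := rfl
    rcases hg : m.get? k with _ | prev
    · -- key not seen yet
      have hc : m.contains k = false := by
        rw [← Bool.not_eq_true, pv_contains_iff, hg]; simp
      have hkk : k ∉ m.keys := fun hmem => by
        rw [(pv_contains_keys m k).mpr hmem] at hc; cases hc
      have hnd' : (m.insert k o).keys.Nodup := by
        have : (m.insert k o).keys = m.keys ++ [k] := by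
          simp [PySem.Dict.keys, pv_insert_fresh m o hc]
        rw [this]
        simp [List.nodup_append, hnd]
        exact fun a ha hak => hkk (hak ▸ ha)
      rw [hc]
      simp only [Bool.false_and, Bool.false_eq_true, if_false]
      rw [ih _ hnd']
      rw [show (m.insert k o).items = m.items ++ [(k, o)] from pv_insert_fresh m o hc]
      rw [hpair, List.append_assoc, List.singleton_append]
    · -- key seen before: the stored value is prev
      have hc : m.contains k = true := (pv_contains_iff m k).mpr (by simp [hg])
      have hgd : m.getD k none = prev := by simp [PySem.Dict.getD, hg]
      have hmem : (k, prev) ∈ m.items := pv_mem_of_get? m hg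
      by_cases hp : prev = o
      · -- same output: the check passes and the insert is a no-op
        subst hp
        rw [hc, hgd]
        simp only [BEq.rfl, Bool.not_true, Bool.and_false, Bool.false_eq_true, if_false]
        rw [pv_insert_self m hnd hg, ih _ hnd]
        rw [hpair]
        constructor
        · intro hP
          rcases List.pairwise_append.mp hP with ⟨h1, h2, h3⟩
          refine List.pairwise_append.mpr ⟨h1, List.pairwise_cons.mpr ⟨fun b hb he => ?_, h2⟩,
            fun a ha p hpm => ?_⟩
          · exact h3 _ hmem b hb he
          · rcases List.mem_cons.mp hpm with rfl | hpr
            · intro he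
              have := pv_uniq m hnd hg a ha he
              simp [this]
            · exact h3 a ha p hpr
        · intro hP
          rcases List.pairwise_append.mp hP with ⟨h1, h2, h3⟩
          exact List.pairwise_append.mpr ⟨h1, (List.pairwise_cons.mp h2).2,
            fun a ha p hpr => h3 a ha p (List.mem_cons.mpr (Or.inr hpr))⟩
      · -- different output: A returns False, and the pair list is inconsistent
        rw [hc, hgd]
        simp only [Bool.true_and]
        rw [if_pos (by simp [hp])]
        simp only [Bool.false_eq_true, false_iff]
        intro hP
        have := (List.pairwise_append.mp hP).2.2 _ hmem (k, o) (by simp [hpair])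
        exact hp (this rfl)

lemma pv_scanB_iff (s : List (String × Option String)) :
    ((List.zip s (s.drop 1)).all (fun q => !(q.1.1 == q.2.1 && !(q.1.2 == q.2.2))) = true)
      ↔ List.IsChain pvPP s := by
  induction s with
  | nil => simp
  | cons a t ih =>
    cases t with
    | nil => simp
    | cons b t' =>
      simp only [List.drop_succ_cons, List.drop_zero] at ih ⊢
      rw [List.isChain_cons_cons, ← ih]
      simp only [List.zip_cons_cons, List.all_cons, Bool.and_eq_true]
      constructor
      · rintro ⟨h1, h2⟩
        refine ⟨fun he => ?_, h2⟩
        by_contra hne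
        simp [he, hne] at h1
      · rintro ⟨h1, h2⟩
        refine ⟨?_, h2⟩
        by_cases he : a.1 = b.1
        · simp [he, h1 he]
        · simp [he]

lemma pv_chain'_and {α : Type} {R S : α → α → Prop} {l : List α}
    (hR : List.IsChain R l) (hS : List.IsChain S l) :
    List.IsChain (fun a b => R a b ∧ S a b) l := by
  induction l with
  | nil => simp
  | cons a t ih =>
    cases t with
    | nil => simp
    | cons b t' =>
      rw [List.isChain_cons_cons] at hR hS ⊢
      exact ⟨⟨hR.1, hS.1⟩, ih hR.2 hS.2⟩

lemma pv_alt_iff (results : List (List (String × Option String))) :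
    check_output_determinism_py_alt results = true
      ↔ List.Pairwise pvPP (results.map pvPairB) := by
  unfold check_output_determinism_py_alt
  rw [pv_scanB_iff]
  set xs := results.map pvPairB with hxs
  set s := PySem.List.sorted xs (fun p => p.1) false with hs
  have hperm : s.Perm xs := PySem.List.sorted_perm xs (fun p => p.1) false
  have hsorted : s.Pairwise (fun a b => a.1 ≤ b.1) := PySem.List.sorted_pairwise xs (fun p => p.1)
  rw [← hperm.pairwise_iff (fun h he => (h he.symm).symm)]
  constructor
  · intro hch
    have hR' : List.IsChain (fun a b : String × Option String => a.1 ≤ b.1 ∧ pvPP a b) s :=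
      pv_chain'_and hsorted.isChain hch
    haveI : Trans (fun a b : String × Option String => a.1 ≤ b.1 ∧ pvPP a b)
        (fun a b : String × Option String => a.1 ≤ b.1 ∧ pvPP a b)
        (fun a b : String × Option String => a.1 ≤ b.1 ∧ pvPP a b) := by
      refine ⟨fun hab hbc => ⟨le_trans hab.1 hbc.1, fun he => ?_⟩⟩
      · have h1 : _ = _ := le_antisymm hab.1 (he ▸ hbc.1)
        exact (hab.2 h1).trans (hbc.2 (h1 ▸ he))
    have := List.isChain_iff_pairwise.mp hR'
    exact this.imp (fun h => h.2)
  · exact fun hP => hP.isChain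

-- ===== VERDICT (by name: the statement is the Claim_ definition above) =====
theorem check_output_determinism_py_spec : Claim_equal_check_output_determinism_py := by
  intro results _
  unfold Spec_check_output_determinism_py
  rw [Bool.eq_iff_iff]
  have hA : check_output_determinism_py results = true
      ↔ List.Pairwise pvPP (results.map pvPairB) := by
    have := pv_loopA_iff results PySem.Dict.empty (by simp [PySem.Dict.empty, PySem.Dict.keys])
    simpa [check_output_determinism_py, PySem.Dict.empty] using this
  rw [hA, pv_alt_iff]
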